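-- pv_equiv track=rewrite | github.com/jmjeon94/Algorithm-Programmers | Lv2/스킬트리.py | solution
-- ===== SOURCE A (Python) =====
-- def solution(skill, skill_trees):
--     answer = 0
--
--     for trees in skill_trees:
--         tmp = ''
--         for ch in trees:
--             if ch in skill:
--                 tmp += ch
--
--         if skill[:len(tmp)]==tmp:
--             answer+=1
--
--     return answer
-- ===== SOURCE B (Python) =====
-- def solution(skill, skill_trees):
--     count = 0
--     for tree in skill_trees:
--         i = 0
--         ok = True
--         for ch in tree:
--             if ch in skill:
--                 if i < len(skill) and ch == skill[i]:
--                     i += 1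
--                 else:
--                     ok = False
--                     break
--         if ok:
--             count += 1
--     return count
-- ===== Notes on version B (the rewrite author's own statement) =====
-- stated objective: simpler
-- what changed: B validates each tree in a single pass with an index into skill (two-pointer prefix matching, breaking at the first mismatch) instead of materialising the filtered string and comparing it to a slice of skill.
import Mathlib
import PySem

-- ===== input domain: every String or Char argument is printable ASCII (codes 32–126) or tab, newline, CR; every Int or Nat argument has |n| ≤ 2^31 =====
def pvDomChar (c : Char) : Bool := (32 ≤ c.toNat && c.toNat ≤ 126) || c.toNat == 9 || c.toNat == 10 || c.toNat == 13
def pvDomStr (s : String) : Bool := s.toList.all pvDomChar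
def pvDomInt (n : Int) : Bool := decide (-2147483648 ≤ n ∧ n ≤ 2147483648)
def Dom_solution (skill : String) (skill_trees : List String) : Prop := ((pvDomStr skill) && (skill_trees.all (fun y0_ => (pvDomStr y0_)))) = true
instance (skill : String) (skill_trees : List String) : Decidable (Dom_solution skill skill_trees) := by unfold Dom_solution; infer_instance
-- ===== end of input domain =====

-- B replaces A's build-filtered-string-then-compare-slice check by a single-pass
-- two-pointer prefix match per tree; objective: simpler.

-- ===== PORT A =====
-- strings are handled as List Char; 'ch in skill' for a single char is exactly
-- skill.toList.contains ch; skill[:len(tmp)] is PySem.List.slice.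
def solution (skill : String) (skill_trees : List String) : Int :=
  skill_trees.foldl (fun answer trees =>
    let tmp : List Char := trees.toList.foldl
      (fun tmp ch => if skill.toList.contains ch then tmp ++ [ch] else tmp) []
    if PySem.List.slice skill.toList none (some (tmp.length : Int)) = tmp then
      answer + 1
    else answer) 0

-- ===== PORT B =====
-- the inner loop of Source B: index i into skill, break (return false) on mismatch
def goB (sk : List Char) : Nat → List Char → Bool
  | _, [] => true
  | i, ch :: rest =>
    if sk.contains ch then
      -- 'if i < len(skill) and ch == skill[i]': combined as the optional lookup
      match sk[i]? with
      | some c => if c == ch then goB sk (i + 1) rest else false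
      | none => false
    else goB sk i rest

def solution_alt (skill : String) (skill_trees : List String) : Int :=
  skill_trees.foldl (fun count tree =>
    if goB skill.toList 0 tree.toList then count + 1 else count) 0

-- ===== PRECONDITION & SPEC =====
def Spec_solution (skill : String) (skill_trees : List String) (out : Int) : Prop := out = solution_alt skill skill_trees
instance (skill : String) (skill_trees : List String) (out : Int) : Decidable (Spec_solution skill skill_trees out) := by unfold Spec_solution; infer_instance

-- ===== CLAIM (what is proved, stated in full; the proofs are below) =====
def Claim_equal_solution : Prop := ∀ (skill : String) (skill_trees : List String), Dom_solution skill skill_trees → Spec_solution skill skill_trees (solution skill skill_trees)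

-- ===== LEMMAS AND PROOFS =====

-- A's inner loop builds exactly the filter of the tree's chars
theorem tmp_eq_filter (sk : List Char) (ts acc : List Char) :
    ts.foldl (fun tmp ch => if sk.contains ch then tmp ++ [ch] else tmp) acc
      = acc ++ ts.filter (fun ch => sk.contains ch) := by
  induction ts generalizing acc with
  | nil => simp
  | cons ch rest ih =>
    simp only [List.foldl_cons, List.filter_cons]
    by_cases h : sk.contains ch = true
    · rw [if_pos h, ih, if_pos h]
      simp
    · rw [if_neg (by simpa using h), ih, if_neg (by simpa using h)]

-- the two-pointer loop decides exactly A's prefix test on the remaining skill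
theorem goB_eq (sk : List Char) (ts : List Char) (i : Nat) :
    goB sk i ts
      = decide ((sk.drop i).take (ts.filter (fun ch => sk.contains ch)).length
                  = ts.filter (fun ch => sk.contains ch)) := by
  induction ts generalizing i with
  | nil => simp [goB]
  | cons ch rest ih =>
    simp only [goB, List.filter_cons]
    by_cases hmem : sk.contains ch = true
    · simp only [hmem, if_pos]
      cases hidx : sk[i]? with
      | none =>
        have hlen : sk.length ≤ i := List.getElem?_eq_none_iff.mp hidx
        have hd : sk.drop i = ([] : List Char) := List.drop_eq_nil_of_le hlen
        simp [hd]
      | some c =>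
        have hdrop : sk.drop i = c :: sk.drop (i + 1) := by
          obtain ⟨hi, he⟩ := List.getElem?_eq_some_iff.mp hidx
          rw [List.drop_eq_getElem_cons hi, he]
        by_cases hc : c = ch
        · subst hc
          simp [hdrop, ih (i + 1)]
        · have hb : (c == ch) = false := by simp [hc]
          simp [hb, hdrop, hc]
    · simp only [hmem]
      have hm : ¬ ch ∈ sk := by simpa using hmem
      simpa [hm] using ih i

-- per-tree: A's slice-prefix test decided equals B's two-pointer loop
theorem per_tree (sk ts : List Char) :
    decide (PySem.List.slice sk none
          (some (((ts.foldl (fun tmp ch => if sk.contains ch then tmp ++ [ch] else tmp) []).length : Nat) : Int))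
        = ts.foldl (fun tmp ch => if sk.contains ch then tmp ++ [ch] else tmp) [])
      = goB sk 0 ts := by
  rw [tmp_eq_filter, goB_eq]
  simp [PySem.List.slice_to_natCast]

-- ===== VERDICT (by name: the statement is the Claim_ definition above) =====
theorem solution_spec : Claim_equal_solution := by
  intro skill skill_trees _
  unfold Spec_solution solution solution_alt
  have hstep : (fun (answer : Int) (trees : String) =>
      let tmp : List Char := trees.toList.foldl
        (fun tmp ch => if skill.toList.contains ch then tmp ++ [ch] else tmp) []
      if PySem.List.slice skill.toList none (some (tmp.length : Int)) = tmp then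
        answer + 1
      else answer)
      = (fun (count : Int) (tree : String) =>
          if goB skill.toList 0 tree.toList then count + 1 else count) := by
    funext a t
    have h := per_tree skill.toList t.toList
    simp only [← h, decide_eq_true_eq]
  rw [hstep]
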